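-- pv_equiv track=rewrite | github.com/jimodeniuren/RenpyAiNieeBridge | replace.py | check_text_tags
-- ===== SOURCE A (Python) =====
-- def check_text_tags(s):
--     """基于Ren'Py的文本标签检查逻辑（修复大小写敏感问题）"""
--     stack = []
--     pos = 0
--     length = len(s)
--
--     SELF_CLOSING_TAGS = {
--         'br', 'w', 'p', 'nw', 'fast', 'slow', 'done', 'wait',
--         'nobr', 'alt', 'art', 'rt', 'rb', 'vbar', '^'
--     }
--
--     while pos < length:
--         if s[pos] == '{':
--             end = s.find('}', pos + 1)
--             if end == -1:
--                 return "未闭合的标签"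
--
--             full_tag = s[pos + 1:end].strip()
--             closing = full_tag.startswith('/')
--
--             # 统一转换为小写处理
--             if closing:
--                 tag_name = full_tag[1:].strip().split()[0].lower()
--             else:
--                 tag_name = full_tag.split()[0].lower()
--
--             if closing:
--                 if not stack:
--                     return f"多余的闭合标签 {{{full_tag}}}"
--                 expected = stack[-1]
--                 if expected != tag_name:
--                     return f"标签不匹配，期望闭合 {expected} 但找到 {tag_name}"
--                 stack.pop()
--             else:
--                 if tag_name in SELF_CLOSING_TAGS:
--                     pass
--                 elif any(tag_name.startswith(prefix) for prefix in ['w=', 'size=']):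
--                     pass
--                 elif tag_name in {'q', 'b', 'i', 'u', 'a', 'font', 'color', 'size',
--                                   'alpha', 'k', 'cps', 's', 'plain', 'noalt'}:
--                     stack.append(tag_name)
--                 else:
--                     return f"未知的标签 {{{full_tag}}}"
--
--             pos = end + 1
--         else:
--             pos += 1
--
--     if stack:
--         return f"未闭合的标签：{' '.join(stack)}"
--
--     return None
-- ===== SOURCE B (Python) =====
-- def check_text_tags(s):
--     """Recursive-descent re-implementation: split the string on the closing brace to
--     tokenize every brace tag in one shot, then parse the token list with a recursive
--     grammar (each open tag's matching close is consumed by a recursive call) instead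
--     of an explicit stack."""
--     SELF_CLOSING = {
--         'br', 'w', 'p', 'nw', 'fast', 'slow', 'done', 'wait',
--         'nobr', 'alt', 'art', 'rt', 'rb', 'vbar', '^'
--     }
--     PAIRED = {'q', 'b', 'i', 'u', 'a', 'font', 'color', 'size',
--               'alpha', 'k', 'cps', 's', 'plain', 'noalt'}
--
--     parts = s.split('}')
--     # each piece before a '}' holds one tag iff it contains '{': from its first '{' on
--     tokens = [p[p.index('{') + 1:] for p in parts[:-1] if '{' in p]
--
--     def parse(i, opened):
--         """Consume tokens from i until the close of `opened` (None = top level).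
--         Returns ('err', msg, _) | ('close', None, next_i) | ('end', unclosed_names, _)."""
--         while i < len(tokens):
--             full = tokens[i].strip()
--             if full.startswith('/'):
--                 name = full[1:].strip().split()[0].lower()
--                 if opened is None:
--                     return ('err', f"多余的闭合标签 {{{full}}}", i)
--                 if name != opened:
--                     return ('err', f"标签不匹配，期望闭合 {opened} 但找到 {name}", i)
--                 return ('close', None, i + 1)
--             name = full.split()[0].lower()
--             if name in SELF_CLOSING or name.startswith(('w=', 'size=')):
--                 i += 1
--             elif name in PAIRED:
--                 st, payload, j = parse(i + 1, name)
--                 if st != 'close':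
--                     if st == 'end':
--                         payload = [name] + payload
--                     return (st, payload, j)
--                 i = j
--             else:
--                 return ('err', f"未知的标签 {{{full}}}", i)
--         return ('end', [], i)
--
--     st, payload, _ = parse(0, None)
--     if st == 'err':
--         return payload
--     if '{' in parts[-1]:
--         return "未闭合的标签"
--     if payload:
--         return f"未闭合的标签：{' '.join(payload)}"
--     return None
-- ===== Notes on version B (the rewrite author's own statement) =====
-- stated objective: alternative
-- what changed: B tokenizes by splitting the whole string on the closing-brace character (one tag per piece that contains an opening brace) and then validates the token list by recursive-descent parsing, where each open tag's matching close is consumed by a recursive call, replacing A's per-character position scan with an explicit stack.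
-- outside the precondition, e.g. on check_text_tags('{x{}}'): A returns '未知的标签 {x{}', B returns '未知的标签 {x{}'; on check_text_tags('{zzz}{}'): A returns '未知的标签 {zzz}', B returns '未知的标签 {zzz}'
import Mathlib
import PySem

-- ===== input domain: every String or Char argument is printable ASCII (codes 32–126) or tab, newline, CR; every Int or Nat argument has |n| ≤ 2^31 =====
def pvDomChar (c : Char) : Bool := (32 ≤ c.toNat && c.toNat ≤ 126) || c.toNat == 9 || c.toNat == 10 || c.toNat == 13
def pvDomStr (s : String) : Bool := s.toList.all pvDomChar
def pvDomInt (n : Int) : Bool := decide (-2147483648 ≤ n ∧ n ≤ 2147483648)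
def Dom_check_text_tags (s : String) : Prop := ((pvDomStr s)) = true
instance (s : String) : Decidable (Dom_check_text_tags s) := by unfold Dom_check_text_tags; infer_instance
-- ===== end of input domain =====

-- B tokenizes by splitting the whole string on the closing-brace character (one tag per piece that
-- contains an opening brace) and then validates the token list by recursive-descent parsing (each open
-- tag's close is consumed by a recursive call) instead of A's per-character scan with an explicit
-- stack; objective: alternative (a timing run measured a constant-factor speedup from str.split).

-- ===== PORT A =====
-- set literals of A ('tag_name in {...}'): membership in a PySem.Set of distinct strings
def pvA_selfClosing : PySem.Set String :=
  PySem.Set.ofList ["br", "w", "p", "nw", "fast", "slow", "done", "wait",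
                    "nobr", "alt", "art", "rt", "rb", "vbar", "^"]
def pvA_openTags : PySem.Set String :=
  PySem.Set.ofList ["q", "b", "i", "u", "a", "font", "color", "size",
                    "alpha", "k", "cps", "s", "plain", "noalt"]

-- the body of A's '{'-branch after 'end' was found: content = s[pos+1:end]; stack top = list head
-- (.headD [] is reached only where Python's split()[0] raises IndexError — excluded by Pre_)
def pvA_handle (stack : List (List Char)) (content : List Char) : Sum String (List (List Char)) :=
  let full_tag := PySem.Chars.strip content
  let closing := PySem.Chars.startswith full_tag ['/']
  let tag_name :=
    if closing then
      PySem.Chars.lower ((PySem.Chars.split₀ (PySem.Chars.strip (full_tag.drop 1))).headD [])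
    else
      PySem.Chars.lower ((PySem.Chars.split₀ full_tag).headD [])
  if closing then
    match stack with
    | [] => .inl ("多余的闭合标签 {" ++ String.ofList full_tag ++ "}")
    | expected :: rest =>
      if expected ≠ tag_name then
        .inl ("标签不匹配，期望闭合 " ++ String.ofList expected ++ " 但找到 " ++ String.ofList tag_name)
      else .inr rest
  else
    if pvA_selfClosing.contains (String.ofList tag_name) then .inr stack
    else if (["w=", "size="].any fun p => PySem.Chars.startswith tag_name p.toList) then .inr stack
    else if pvA_openTags.contains (String.ofList tag_name) then .inr (tag_name :: stack)
    else .inl ("未知的标签 {" ++ String.ofList full_tag ++ "}")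

-- A's while loop over pos: structural scan of the remaining characters.
-- 's.find('}', pos+1) == -1' is '¬ rest.contains '}''; content/next-pos via takeWhile/dropWhile (exact).
def pvA_go (cs : List Char) (stack : List (List Char)) : Option String :=
  match cs with
  | [] =>
    if stack.isEmpty then none
    else some ("未闭合的标签：" ++ String.ofList (PySem.Chars.join [' '] stack.reverse))
  | c :: rest =>
    if c = '{' then
      if rest.contains '}' then
        match pvA_handle stack (rest.takeWhile (· ≠ '}')) with
        | .inl e => some e
        | .inr st => pvA_go ((rest.dropWhile (· ≠ '}')).tail) st
      else some "未闭合的标签"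
    else pvA_go rest stack
termination_by cs.length
decreasing_by
  · have h1 := List.length_dropWhile_le (fun x => decide (x ≠ '}')) rest
    have h2 : (List.tail (rest.dropWhile (fun x => decide (x ≠ '}')))).length = (rest.dropWhile (fun x => decide (x ≠ '}'))).length - 1 := List.length_tail
    simp only [List.length_cons]; omega
  · simp

def check_text_tags (s : String) : Option String := pvA_go s.toList []

-- ===== PORT B =====
def pvB_selfClosing : PySem.Set String :=
  PySem.Set.ofList ["br", "w", "p", "nw", "fast", "slow", "done", "wait",
                    "nobr", "alt", "art", "rt", "rb", "vbar", "^"]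
def pvB_paired : PySem.Set String :=
  PySem.Set.ofList ["q", "b", "i", "u", "a", "font", "color", "size",
                    "alpha", "k", "cps", "s", "plain", "noalt"]

-- result of B's parse(): ('err', msg, _) | ('close', None, j) | ('end', names, _);
-- the "next position" j is carried as the list of not-yet-consumed tokens
inductive PvPSt
  | err : String → PvPSt
  | close : PvPSt
  | fin : List (List Char) → PvPSt
deriving Repr, DecidableEq

-- B's recursive-descent parse: the while loop over i is the tail recursion, the nested call
-- parse(i+1, name) consumes up to the close of `name`.  fuel (= number of still-unconsumed
-- tokens at the top call) only makes the recursion structural; it is never exhausted.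
def pvB_parse (fuel : Nat) (toks : List (List Char)) (opened : Option (List Char)) :
    PvPSt × List (List Char) :=
  match fuel, toks with
  | 0, ts => (.fin [], ts)
  | _ + 1, [] => (.fin [], [])
  | fuel + 1, t :: rest =>
    let full := PySem.Chars.strip t
    if PySem.Chars.startswith full ['/'] then
      -- (.headD [] is reached only where Python's split()[0] raises IndexError — excluded by Pre_)
      let name := PySem.Chars.lower ((PySem.Chars.split₀ (PySem.Chars.strip (full.drop 1))).headD [])
      match opened with
      | none => (.err ("多余的闭合标签 {" ++ String.ofList full ++ "}"), rest)
      | some exp =>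
        if name ≠ exp then
          (.err ("标签不匹配，期望闭合 " ++ String.ofList exp ++ " 但找到 " ++ String.ofList name), rest)
        else (.close, rest)
    else
      let name := PySem.Chars.lower ((PySem.Chars.split₀ full).headD [])
      if pvB_selfClosing.contains (String.ofList name)
          || PySem.Chars.startswith name "w=".toList
          || PySem.Chars.startswith name "size=".toList then
        pvB_parse fuel rest opened
      else if pvB_paired.contains (String.ofList name) then
        match pvB_parse fuel rest (some name) with
        | (.err e, r) => (.err e, r)
        | (.fin names, r) => (.fin (name :: names), r)
        | (.close, r) => pvB_parse fuel r opened
      else (.err ("未知的标签 {" ++ String.ofList full ++ "}"), rest)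

def check_text_tags_alt (s : String) : Option String :=
  let parts := PySem.Chars.splitOn s.toList ['}']
  -- p[p.index('{') + 1:] with '{' in p: everything after the FIRST '{' of p — exact, since
  -- index('{') is the length of the (≠ '{')-prefix, so the slice is tail of dropWhile
  let tokens := parts.dropLast.filterMap (fun p =>
    if p.contains '{' then some ((p.dropWhile (· ≠ '{')).tail) else none)
  match pvB_parse tokens.length tokens none with
  | (.err e, _) => some e
  | (.fin names, _) =>
    if (parts.getLastD []).contains '{' then some "未闭合的标签"
    else if names.isEmpty then none
    else some ("未闭合的标签：" ++ String.ofList (PySem.Chars.join [' '] names))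
  | (.close, _) =>        -- Python: st == 'close' is unreachable at top level; payload None is falsy
    if (parts.getLastD []).contains '{' then some "未闭合的标签" else none

-- ===== PRECONDITION & SPEC =====
-- Pre_ excludes strings containing a '{'…'}' pair whose tag text strips to '' or to '/' plus
-- whitespace: there Python A (and B alike) raises IndexError from split()[0].  The condition
-- checks every such brace pair, so it also excludes a few strings whose degenerate pair is never
-- reached (it sits inside another tag's text, or after an earlier error); on those A and B
-- return the same error value anyway.
def Pre_check_text_tags (s : String) : Prop :=
  ∀ i < s.toList.length, s.toList[i]? = some '{' →
    ((s.toList.drop (i + 1)).contains '}') = true →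
    (let t := PySem.Chars.strip ((s.toList.drop (i + 1)).takeWhile (· ≠ '}'))
     ¬ (t = [] ∨ (PySem.Chars.startswith t ['/'] = true ∧ PySem.Chars.strip (t.drop 1) = [])))
instance (s : String) : Decidable (Pre_check_text_tags s) := by
  unfold Pre_check_text_tags; infer_instance

def pvWitness_check_text_tags : String := "{b}bold{/b} {w=1.0}"

def Spec_check_text_tags (s : String) (out : Option String) : Prop := out = check_text_tags_alt s
instance (s : String) (out : Option String) : Decidable (Spec_check_text_tags s out) := by
  unfold Spec_check_text_tags; infer_instance

-- ===== CLAIM (what is proved, stated in full; the proofs are below) =====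
def Claim_equal_check_text_tags : Prop :=
  ∀ (s : String), Dom_check_text_tags s → Pre_check_text_tags s →
    Spec_check_text_tags s (check_text_tags s)

-- ===== LEMMAS AND PROOFS =====

-- A = B is shown through an intermediate machine: A's scan equals "tokenize (pvB_findTags),
-- then run the explicit stack loop (pvL/pvFin)"; the tokenizer equals B's split-on-'}' pieces
-- (via sos, a structural model of str.split('}')); the stack loop equals B's recursive descent.

-- structural model of s.split('}')
def sos : List Char → List (List Char)
  | [] => [[]]
  | c :: rest => if c = '}' then [] :: sos rest else (sos rest).modifyHead (c :: ·)

-- B's tokens, read off a piece list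
def pvTokf (p : List Char) : Option (List Char) :=
  if p.contains '{' then some ((p.dropWhile (· ≠ '{')).tail) else none
def pvTokens (ps : List (List Char)) : List (List Char) := ps.dropLast.filterMap pvTokf

-- A-side tokenizer: (tag contents in order, suffix after the last consumed '}')
def pvB_findTags (cs : List Char) : List (List Char) × List Char :=
  match cs with
  | [] => ([], [])
  | c :: rest =>
    if c = '{' ∧ rest.contains '}' then
      let content := rest.takeWhile (· ≠ '}')
      let after := (rest.dropWhile (· ≠ '}')).tail
      let p := pvB_findTags after
      (content :: p.1, if p.1.isEmpty then after else p.2)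
    else
      let p := pvB_findTags rest
      (p.1, if p.1.isEmpty then c :: rest else p.2)
termination_by cs.length
decreasing_by
  · have h1 := List.length_dropWhile_le (fun x => decide (x ≠ '}')) rest
    have h2 : (List.tail (rest.dropWhile (fun x => decide (x ≠ '}')))).length = (rest.dropWhile (fun x => decide (x ≠ '}'))).length - 1 := List.length_tail
    simp only [List.length_cons]; omega
  · simp

-- explicit stack loop over the tokens, with A's per-tag body
def pvL (ts : List (List Char)) (st : List (List Char)) : Sum String (List (List Char)) :=
  match ts with
  | [] => .inr st
  | t :: rest =>
    match pvA_handle st t with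
    | .inl e => .inl e
    | .inr st' => pvL rest st'

def pvFin (p : List (List Char) × List Char) (stack : List (List Char)) : Option String :=
  match pvL p.1 stack with
  | .inl e => some e
  | .inr st =>
    if p.2.contains '{' then some "未闭合的标签"
    else if st.isEmpty then none
    else some ("未闭合的标签：" ++ String.ofList (PySem.Chars.join [' '] st.reverse))

-- B's parse at its call-site fuel
def pT (ts : List (List Char)) (o : Option (List Char)) : PvPSt × List (List Char) :=
  pvB_parse ts.length ts o

theorem sos_length_pos (cs : List Char) : 0 < (sos cs).length := by
  induction cs with
  | nil => simp [sos]
  | cons c rest ih => by_cases h : c = '}' <;> simp [sos, h, ih]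

theorem sos_no_close (cs : List Char) (h : cs.contains '}' = false) : sos cs = [cs] := by
  induction cs with
  | nil => rfl
  | cons c rest ih =>
    simp at h
    simp [sos, ih (by simpa using h.2), Ne.symm h.1]

theorem sos_chunk (pre post : List Char) (h : pre.contains '}' = false) :
    sos (pre ++ '}' :: post) = pre :: sos post := by
  induction pre with
  | nil => simp [sos]
  | cons a pre' ih =>
    simp at h
    simp [sos, Ne.symm h.1, ih (by simpa using h.2)]

theorem go_eq (fuel : Nat) (l cur : List Char) (accs : List (List Char))
    (h : l.length < fuel) :
    PySem.Chars.splitOn.go ['}'] fuel l cur accs =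
      accs.reverse ++ (sos l).modifyHead (cur.reverse ++ ·) := by
  induction fuel generalizing l cur accs with
  | zero => omega
  | succ fuel ih =>
    match l with
    | [] => simp [PySem.Chars.splitOn.go, sos]
    | c :: rest =>
      rw [PySem.Chars.splitOn.go]
      by_cases hc : c = '}'
      · subst hc
        simp only [List.isPrefixOf_cons₂]
        simp only [show ('}' == '}') = true from rfl, List.isPrefixOf_nil_left, Bool.and_true,
          if_pos]
        simp only [List.length_cons, List.drop_succ_cons, List.length_nil, List.drop_zero]
        rw [ih rest [] (cur.reverse :: accs) (by simp at h; omega)]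
        simp only [sos, List.reverse_cons, List.append_assoc, List.singleton_append]
        obtain ⟨hd, tl, he⟩ := List.exists_cons_of_ne_nil (List.ne_nil_of_length_pos (sos_length_pos rest))
        simp [he]
      · have hp : (['}'].isPrefixOf (c :: rest)) = false := by
          simp [List.isPrefixOf_cons₂]
          exact fun hh => (hc hh.symm).elim
        rw [if_neg (by simp [hp])]
        rw [ih rest (c :: cur) accs (by simp at h ⊢; omega)]
        have hne : sos rest ≠ [] := List.ne_nil_of_length_pos (sos_length_pos rest)
        obtain ⟨hd, tl, he⟩ := List.exists_cons_of_ne_nil hne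
        simp [sos, hc, he, List.modifyHead_cons]

theorem splitOn_eq_sos (cs : List Char) : PySem.Chars.splitOn cs ['}'] = sos cs := by
  unfold PySem.Chars.splitOn
  rw [go_eq (cs.length + 1) cs [] [] (by omega)]
  obtain ⟨hd, tl, he⟩ := List.exists_cons_of_ne_nil (List.ne_nil_of_length_pos (sos_length_pos cs))
  simp [he]

theorem dropWhile_close (rest : List Char) (h : rest.contains '}' = true) :
    rest.dropWhile (· ≠ '}') = '}' :: (rest.dropWhile (· ≠ '}')).tail := by
  induction rest with
  | nil => simp at h
  | cons c cs ih =>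
    by_cases hc : c = '}'
    · simp [hc]
    · simp at h
      rw [List.dropWhile_cons]
      simp only [hc, ne_eq, not_false_iff, decide_true, if_pos]
      exact ih (by simpa using h.resolve_left (fun hh => hc hh.symm))

theorem takeWhile_no_close (rest : List Char) :
    (rest.takeWhile (· ≠ '}')).contains '}' = false := by
  simp only [List.contains_eq_mem, decide_eq_false_iff_not]
  intro ha
  have := List.mem_takeWhile_imp ha
  simp at this

theorem chunk_decomp (rest : List Char) (h : rest.contains '}' = true) :
    rest = rest.takeWhile (· ≠ '}') ++ '}' :: (rest.dropWhile (· ≠ '}')).tail := by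
  conv_lhs => rw [← List.takeWhile_append_dropWhile (p := (· ≠ '}')) (l := rest)]
  rw [← dropWhile_close rest h]

-- findTags unfolding equations
theorem findTags_nil : pvB_findTags [] = ([], []) := by rw [pvB_findTags]

theorem findTags_cons_pos (rest : List Char) (hr : rest.contains '}' = true) :
    pvB_findTags ('{' :: rest) =
      ((rest.takeWhile (· ≠ '}')) :: (pvB_findTags ((rest.dropWhile (· ≠ '}')).tail)).1,
       if (pvB_findTags ((rest.dropWhile (· ≠ '}')).tail)).1.isEmpty then
         (rest.dropWhile (· ≠ '}')).tail
       else (pvB_findTags ((rest.dropWhile (· ≠ '}')).tail)).2) := by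
  rw [pvB_findTags]; simp [show '}' ∈ rest by simpa using hr]

theorem findTags_cons_neg (c : Char) (rest : List Char)
    (h : ¬ (c = '{' ∧ rest.contains '}' = true)) :
    pvB_findTags (c :: rest) =
      ((pvB_findTags rest).1,
       if (pvB_findTags rest).1.isEmpty then c :: rest else (pvB_findTags rest).2) := by
  rw [pvB_findTags]; simp only [h, if_false]

theorem findTags_nil_tail (cs : List Char) (h : (pvB_findTags cs).1 = []) :
    (pvB_findTags cs).2 = cs := by
  induction cs using pvB_findTags.induct with
  | case1 => rw [findTags_nil]
  | case2 c rest hg after ih =>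
    obtain ⟨hc, hr⟩ := hg
    subst hc
    rw [findTags_cons_pos rest hr] at h
    exact absurd h (by simp)
  | case3 c rest hg ih =>
    rw [findTags_cons_neg c rest hg] at h ⊢
    simp only at h
    simp [h]

theorem findTags_no_close (cs : List Char) (h : cs.contains '}' = false) :
    (pvB_findTags cs).1 = [] := by
  induction cs using pvB_findTags.induct with
  | case1 => rw [findTags_nil]
  | case2 c rest hg after ih =>
    obtain ⟨hc, hr⟩ := hg
    subst hc
    simp at h
    exact absurd (by simpa using hr) h
  | case3 c rest hg ih =>
    have hr : rest.contains '}' = false := by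
      simp at h ⊢; tauto
    rw [findTags_cons_neg c rest hg]
    simp [ih hr]

theorem tail_if (l : List Char) :
    (if (pvB_findTags l).1.isEmpty = true then l else (pvB_findTags l).2) = (pvB_findTags l).2 := by
  by_cases hp : (pvB_findTags l).1 = []
  · rw [findTags_nil_tail _ hp]; simp
  · simp [List.isEmpty_iff, hp]

-- A-go unfolding equations
theorem go_nil (stack : List (List Char)) :
    pvA_go [] stack =
      (if stack.isEmpty then none
       else some ("未闭合的标签：" ++ String.ofList (PySem.Chars.join [' '] stack.reverse))) := by
  rw [pvA_go]

theorem go_brace_pos (rest : List Char) (stack : List (List Char))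
    (hr : rest.contains '}' = true) :
    pvA_go ('{' :: rest) stack =
      (match pvA_handle stack (rest.takeWhile (· ≠ '}')) with
       | .inl e => some e
       | .inr st => pvA_go ((rest.dropWhile (· ≠ '}')).tail) st) := by
  rw [pvA_go]; simp [show '}' ∈ rest by simpa using hr]

theorem go_brace_noclose (rest : List Char) (stack : List (List Char))
    (hr : rest.contains '}' = false) :
    pvA_go ('{' :: rest) stack = some "未闭合的标签" := by
  rw [pvA_go]; simp [show ¬ '}' ∈ rest by simpa using hr]

theorem go_other (c : Char) (rest : List Char) (stack : List (List Char)) (hc : ¬ c = '{') :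
    pvA_go (c :: rest) stack = pvA_go rest stack := by
  rw [pvA_go]; simp only [hc, if_false]

-- A's scan = tokenize, then the explicit stack loop
theorem main_eq (cs : List Char) (stack : List (List Char)) :
    pvA_go cs stack = pvFin (pvB_findTags cs) stack := by
  induction cs using pvB_findTags.induct generalizing stack with
  | case1 =>
    rw [go_nil, findTags_nil]
    simp [pvFin, pvL]
  | case2 c rest hg after ih =>
    obtain ⟨hc, hr⟩ := hg
    subst hc
    have ih' : ∀ st, pvA_go ((rest.dropWhile (· ≠ '}')).tail) st =
        pvFin (pvB_findTags ((rest.dropWhile (· ≠ '}')).tail)) st := ih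
    rw [go_brace_pos rest stack hr, findTags_cons_pos rest hr]
    cases hh : pvA_handle stack (rest.takeWhile (· ≠ '}')) with
    | inl e => simp only [pvFin, pvL, hh]
    | inr st => simp only [pvFin, pvL, hh, ih', tail_if]
  | case3 c rest hg ih =>
    by_cases hc : c = '{'
    · subst hc
      have hr : rest.contains '}' = false := by
        by_contra hx
        exact hg ⟨rfl, by simpa using hx⟩
      have h1 := findTags_no_close rest hr
      have ht := findTags_nil_tail rest h1
      rw [go_brace_noclose rest stack hr, findTags_cons_neg _ rest hg]
      simp [pvFin, pvL, h1]
    · rw [go_other c rest stack hc, findTags_cons_neg c rest hg, ih stack]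
      by_cases hp : (pvB_findTags rest).1 = []
      · have ht := findTags_nil_tail rest hp
        simp [pvFin, pvL, hp, ht, Ne.symm hc]
      · simp [pvFin, List.isEmpty_iff, hp]


-- pvTokens step lemmas
theorem dropLast_cons_ne {α : Type} (p : α) (ps : List α) (h : ps ≠ []) :
    (p :: ps).dropLast = p :: ps.dropLast := by
  cases ps with
  | nil => exact absurd rfl h
  | cons q qs => rfl

theorem getLastD_cons_ne (p : List Char) (ps : List (List Char)) (h : ps ≠ []) :
    (p :: ps).getLastD [] = ps.getLastD [] := by
  cases ps with
  | nil => exact absurd rfl h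
  | cons q qs => simp

theorem tokens_cons_none (p : List Char) (ps : List (List Char)) (h : ps ≠ [])
    (hf : pvTokf p = none) : pvTokens (p :: ps) = pvTokens ps := by
  unfold pvTokens
  rw [dropLast_cons_ne p ps h, List.filterMap_cons, hf]

theorem tokens_cons_some (p t : List Char) (ps : List (List Char)) (h : ps ≠ [])
    (hf : pvTokf p = some t) : pvTokens (p :: ps) = t :: pvTokens ps := by
  unfold pvTokens
  rw [dropLast_cons_ne p ps h, List.filterMap_cons, hf]

theorem tokf_cons_ne (c : Char) (p : List Char) (hc : c ≠ '{') :
    pvTokf (c :: p) = pvTokf p := by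
  simp [pvTokf, hc, Ne.symm hc]

theorem sos_ne_nil (cs : List Char) : sos cs ≠ [] :=
  List.ne_nil_of_length_pos (sos_length_pos cs)

-- the split pieces carry exactly A's tokens, and the last piece carries the stray '{' flag
theorem st2 (cs : List Char) :
    pvTokens (sos cs) = (pvB_findTags cs).1 ∧
    ((sos cs).getLastD []).contains '{' = (pvB_findTags cs).2.contains '{' := by
  induction cs using pvB_findTags.induct with
  | case1 =>
    rw [findTags_nil]
    constructor
    · rfl
    · rfl
  | case2 c rest hg after ih =>
    obtain ⟨hc, hr⟩ := hg
    subst hc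
    have hdec : ('{' :: rest) = ('{' :: rest.takeWhile (· ≠ '}')) ++ '}' :: after := by
      conv_lhs => rw [chunk_decomp rest hr]
      simp [after]
    have hno : ('{' :: rest.takeWhile (· ≠ '}')).contains '}' = false := by
      have := takeWhile_no_close rest
      simp only [List.contains_cons, this, Bool.or_false]
      decide
    have hsos : sos ('{' :: rest) = ('{' :: rest.takeWhile (· ≠ '}')) :: sos after := by
      rw [hdec, sos_chunk _ _ hno]
    have htokf : pvTokf ('{' :: rest.takeWhile (· ≠ '}')) = some (rest.takeWhile (· ≠ '}')) := by
      simp [pvTokf]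
    rw [findTags_cons_pos rest hr, tail_if]
    constructor
    · rw [hsos, tokens_cons_some _ _ _ (sos_ne_nil after) htokf, ih.1]
    · rw [hsos, getLastD_cons_ne _ _ (sos_ne_nil after)]
      exact ih.2
  | case3 c rest hg ih =>
    by_cases hrc : rest.contains '}' = true
    · have hc : c ≠ '{' := fun h => hg ⟨h, hrc⟩
      rw [findTags_cons_neg c rest hg]
      have hstep : pvTokens (sos (c :: rest)) = pvTokens (sos rest) ∧
          ((sos (c :: rest)).getLastD []).contains '{' = ((sos rest).getLastD []).contains '{' := by
        by_cases hcc : c = '}'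
        · subst hcc
          have hsos : sos ('}' :: rest) = [] :: sos rest := by simp [sos]
          rw [hsos, tokens_cons_none _ _ (sos_ne_nil rest) (by simp [pvTokf]),
              getLastD_cons_ne _ _ (sos_ne_nil rest)]
          exact ⟨rfl, rfl⟩
        · have hdec := chunk_decomp rest hrc
          have hrest : sos rest =
              (rest.takeWhile (· ≠ '}')) :: sos ((rest.dropWhile (· ≠ '}')).tail) := by
            conv_lhs => rw [hdec]
            exact sos_chunk _ _ (takeWhile_no_close rest)
          have hsos : sos (c :: rest) =
              (c :: rest.takeWhile (· ≠ '}')) :: sos ((rest.dropWhile (· ≠ '}')).tail) := by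
            rw [sos]
            simp only [hcc, if_false]
            rw [hrest, List.modifyHead_cons]
          constructor
          · rw [hsos, hrest]
            cases hf : pvTokf (rest.takeWhile (· ≠ '}')) with
            | none =>
              rw [tokens_cons_none _ _ (sos_ne_nil _) ((tokf_cons_ne c _ hc).trans hf),
                  tokens_cons_none _ _ (sos_ne_nil _) hf]
            | some t =>
              rw [tokens_cons_some _ _ _ (sos_ne_nil _) ((tokf_cons_ne c _ hc).trans hf),
                  tokens_cons_some _ _ _ (sos_ne_nil _) hf]
          · rw [hsos, hrest, getLastD_cons_ne _ _ (sos_ne_nil _),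
                getLastD_cons_ne _ _ (sos_ne_nil _)]
      refine ⟨hstep.1.trans ih.1, ?_⟩
      by_cases hp : (pvB_findTags rest).1 = []
      · have ht := findTags_nil_tail rest hp
        simp only [hp, List.isEmpty_nil, if_true]
        rw [hstep.2, ih.2, ht]
        have hcne : c ≠ '{' := hc
        simp [Ne.symm hcne]
      · simp only [List.isEmpty_iff, hp, if_false]
        exact hstep.2.trans ih.2
    · -- no '}' in rest: at most the head could be '}', split on that
      by_cases hcc : c = '}'
      · subst hcc
        rw [findTags_cons_neg _ rest hg]
        have hsos : sos ('}' :: rest) = [] :: sos rest := by simp [sos]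
        have h1 : (pvB_findTags rest).1 = [] :=
          findTags_no_close rest (by simpa using hrc)
        have hsr : sos rest = [rest] := sos_no_close rest (by simpa using hrc)
        refine ⟨?_, ?_⟩
        · rw [hsos, tokens_cons_none _ _ (sos_ne_nil rest) (by simp [pvTokf]), hsr, h1]
          rfl
        · rw [hsos, getLastD_cons_ne _ _ (sos_ne_nil rest), hsr]
          simp [h1]
      · have hall : ((c :: rest).contains '}') = false := by
          simp [Ne.symm hcc]
          simpa using hrc
        have hsos : sos (c :: rest) = [c :: rest] := sos_no_close _ hall
        have h1 : (pvB_findTags (c :: rest)).1 = [] := findTags_no_close _ hall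
        have ht := findTags_nil_tail _ h1
        refine ⟨?_, ?_⟩
        · rw [hsos, h1]; rfl
        · rw [hsos, ht]; rfl


-- fuel facts for B's parse
theorem parse_len_le (f : Nat) : ∀ (ts : List (List Char)) (o : Option (List Char)),
    (pvB_parse f ts o).2.length ≤ ts.length := by
  induction f with
  | zero => intro ts o; simp [pvB_parse]
  | succ f ih =>
    intro ts o
    match ts with
    | [] => simp [pvB_parse]
    | t :: rest =>
      rw [pvB_parse]
      dsimp only
      split
      · split
        · simp
        · split
          · simp
          · simp
      · split
        · exact le_trans (ih rest o) (by simp)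
        · split
          · split
            · rename_i heq
              have := ih rest (some (PySem.Chars.lower ((PySem.Chars.split₀ (PySem.Chars.strip t)).headD [])))
              rw [heq] at this
              simpa using le_trans this (by simp)
            · rename_i heq
              have := ih rest (some (PySem.Chars.lower ((PySem.Chars.split₀ (PySem.Chars.strip t)).headD [])))
              rw [heq] at this
              simpa using le_trans this (by simp)
            · rename_i r heq
              have h1 := ih rest (some (PySem.Chars.lower ((PySem.Chars.split₀ (PySem.Chars.strip t)).headD [])))
              rw [heq] at h1
              have h2 := ih r o
              simp at h1
              exact le_trans (le_trans h2 h1) (by simp)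
          · simp

theorem parse_fuel_eq (f : Nat) : ∀ (g : Nat) (ts : List (List Char)) (o : Option (List Char)),
    ts.length ≤ f → ts.length ≤ g → pvB_parse f ts o = pvB_parse g ts o := by
  induction f with
  | zero =>
    intro g ts o hf hg
    have : ts = [] := List.eq_nil_of_length_eq_zero (by omega)
    subst this
    cases g <;> simp [pvB_parse]
  | succ f ih =>
    intro g ts o hf hg
    match ts with
    | [] => cases g <;> simp [pvB_parse]
    | t :: rest =>
      match g with
      | 0 => simp at hg
      | g + 1 =>
        rw [pvB_parse, pvB_parse]
        dsimp only
        split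
        · rfl
        · have hlen : rest.length ≤ f := by simp at hf; omega
          have hleng : rest.length ≤ g := by simp at hg; omega
          split
          · exact ih g rest o hlen hleng
          · split
            · rw [ih g rest (some (PySem.Chars.lower ((PySem.Chars.split₀ (PySem.Chars.strip t)).headD []))) hlen hleng]
              split
              · rfl
              · rfl
              · rename_i r heq
                have hr : r.length ≤ rest.length := by
                  have := parse_len_le g rest (some (PySem.Chars.lower ((PySem.Chars.split₀ (PySem.Chars.strip t)).headD [])))
                  rw [heq] at this
                  simpa using this
                exact ih g r o (le_trans hr hlen) (le_trans hr hleng)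
            · rfl

-- pT unfolding equations
theorem pT_nil (o : Option (List Char)) : pT [] o = (.fin [], []) := rfl

theorem pT_cons (t : List Char) (rest : List (List Char)) (o : Option (List Char)) :
    pT (t :: rest) o =
      (let full := PySem.Chars.strip t
       if PySem.Chars.startswith full ['/'] then
         let name := PySem.Chars.lower ((PySem.Chars.split₀ (PySem.Chars.strip (full.drop 1))).headD [])
         match o with
         | none => (.err ("多余的闭合标签 {" ++ String.ofList full ++ "}"), rest)
         | some exp =>
           if name ≠ exp then
             (.err ("标签不匹配，期望闭合 " ++ String.ofList exp ++ " 但找到 " ++ String.ofList name), rest)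
           else (.close, rest)
       else
         let name := PySem.Chars.lower ((PySem.Chars.split₀ full).headD [])
         if pvB_selfClosing.contains (String.ofList name)
             || PySem.Chars.startswith name "w=".toList
             || PySem.Chars.startswith name "size=".toList then
           pT rest o
         else if pvB_paired.contains (String.ofList name) then
           match pT rest (some name) with
           | (.err e, r) => (.err e, r)
           | (.fin names, r) => (.fin (name :: names), r)
           | (.close, r) => pT r o
         else (.err ("未知的标签 {" ++ String.ofList full ++ "}"), rest)) := by
  show pvB_parse (rest.length + 1) (t :: rest) o = _
  rw [pvB_parse]
  dsimp only
  split
  · rfl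
  · split
    · rfl
    · split
      · show (match pvB_parse rest.length rest (some (PySem.Chars.lower ((PySem.Chars.split₀ (PySem.Chars.strip t)).headD []))) with
          | (PvPSt.err e, r) => (PvPSt.err e, r)
          | (PvPSt.fin names, r) => (PvPSt.fin ((PySem.Chars.lower ((PySem.Chars.split₀ (PySem.Chars.strip t)).headD [])) :: names), r)
          | (PvPSt.close, r) => pvB_parse rest.length r o) = _
        split
        · rename_i heq
          unfold pT
          rw [heq]
        · rename_i heq
          unfold pT
          rw [heq]
        · rename_i r heq
          unfold pT
          rw [heq]
          have hr : r.length ≤ rest.length := by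
            have := parse_len_le rest.length rest (some (PySem.Chars.lower ((PySem.Chars.split₀ (PySem.Chars.strip t)).headD [])))
            rw [heq] at this
            simpa using this
          exact parse_fuel_eq rest.length r.length r o hr le_rfl
      · rfl


-- per-token: A's handle and B's parse make the same decisions (the two set literals are equal)
theorem sets_self : pvA_selfClosing = pvB_selfClosing := rfl
theorem sets_open : pvA_openTags = pvB_paired := rfl

-- the disjunction A spells as list.any is B's two-way or
theorem cond_eq (name : List Char) :
    (["w=", "size="].any fun p => PySem.Chars.startswith name p.toList) =
    (PySem.Chars.startswith name "w=".toList || PySem.Chars.startswith name "size=".toList) := by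
  simp [List.any_cons, List.any_nil]

-- clean unfoldings of A's per-tag body
theorem handle_closing (st : List (List Char)) (t : List Char)
    (hcl : PySem.Chars.startswith (PySem.Chars.strip t) ['/'] = true) :
    pvA_handle st t =
      (match st with
       | [] => .inl ("多余的闭合标签 {" ++ String.ofList (PySem.Chars.strip t) ++ "}")
       | expected :: rest =>
         if PySem.Chars.lower ((PySem.Chars.split₀ (PySem.Chars.strip ((PySem.Chars.strip t).drop 1))).headD []) ≠ expected then
           .inl ("标签不匹配，期望闭合 " ++ String.ofList expected ++ " 但找到 " ++
                 String.ofList (PySem.Chars.lower ((PySem.Chars.split₀ (PySem.Chars.strip ((PySem.Chars.strip t).drop 1))).headD [])))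
         else .inr rest) := by
  cases st with
  | nil => simp [pvA_handle, hcl]
  | cons e r =>
    by_cases hne : e = PySem.Chars.lower ((PySem.Chars.split₀ (PySem.Chars.strip ((PySem.Chars.strip t).drop 1))).headD [])
    · simp [pvA_handle, hcl, hne]
    · simp [pvA_handle, hcl]
      rw [if_neg (fun hh => hne (by simpa using hh)), if_neg (fun hh => hne (by simpa using hh.symm))]

theorem handle_open (st : List (List Char)) (t : List Char)
    (hcl : PySem.Chars.startswith (PySem.Chars.strip t) ['/'] = false) :
    pvA_handle st t =
      (if pvB_selfClosing.contains (String.ofList (PySem.Chars.lower ((PySem.Chars.split₀ (PySem.Chars.strip t)).headD []))) then .inr st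
       else if (PySem.Chars.startswith (PySem.Chars.lower ((PySem.Chars.split₀ (PySem.Chars.strip t)).headD [])) "w=".toList ||
                PySem.Chars.startswith (PySem.Chars.lower ((PySem.Chars.split₀ (PySem.Chars.strip t)).headD [])) "size=".toList) then .inr st
       else if pvB_paired.contains (String.ofList (PySem.Chars.lower ((PySem.Chars.split₀ (PySem.Chars.strip t)).headD []))) then .inr ((PySem.Chars.lower ((PySem.Chars.split₀ (PySem.Chars.strip t)).headD [])) :: st)
       else .inl ("未知的标签 {" ++ String.ofList (PySem.Chars.strip t) ++ "}")) := by
  simp only [pvA_handle, hcl, Bool.false_eq_true, if_false, sets_self, sets_open, cond_eq]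

-- the explicit stack loop (nonempty stack) equals B's parse called with the innermost open tag
theorem key : ∀ (n : Nat) (ts : List (List Char)), ts.length ≤ n →
    ∀ (exp : List Char) (st' : List (List Char)),
    pvL ts (exp :: st') =
      (match pT ts (some exp) with
       | (.err e, _) => .inl e
       | (.fin names, _) => .inr (names.reverse ++ exp :: st')
       | (.close, rest) => pvL rest st') := by
  intro n
  induction n with
  | zero =>
    intro ts hts exp st'
    have : ts = [] := List.eq_nil_of_length_eq_zero (by omega)
    subst this
    rw [pT_nil]
    simp [pvL]
  | succ n ih =>
    intro ts hts exp st'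
    match ts with
    | [] =>
      rw [pT_nil]
      simp [pvL]
    | t :: rest =>
      have hr : rest.length ≤ n := by simp at hts; omega
      rw [pvL, pT_cons]
      dsimp only
      by_cases hcl : PySem.Chars.startswith (PySem.Chars.strip t) ['/'] = true
      · rw [handle_closing _ _ hcl, if_pos hcl]
        dsimp only
        split_ifs with h1 <;> rfl
      · rw [handle_open _ _ (by simpa using hcl), if_neg hcl]
        by_cases hs : pvB_selfClosing.contains (String.ofList (PySem.Chars.lower ((PySem.Chars.split₀ (PySem.Chars.strip t)).headD []))) = true
        · rw [if_pos hs, if_pos (by rw [hs]; rfl)]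
          exact ih rest hr exp st'
        · rw [Bool.not_eq_true] at hs
          rw [if_neg (by rw [hs]; simp)]
          by_cases hw : (PySem.Chars.startswith (PySem.Chars.lower ((PySem.Chars.split₀ (PySem.Chars.strip t)).headD [])) "w=".toList || PySem.Chars.startswith (PySem.Chars.lower ((PySem.Chars.split₀ (PySem.Chars.strip t)).headD [])) "size=".toList) = true
          · rw [if_pos hw, if_pos (by rw [hs]; exact hw)]
            exact ih rest hr exp st'
          · rw [Bool.not_eq_true] at hw
            rw [if_neg (show ¬ ((pvB_selfClosing.contains (String.ofList (PySem.Chars.lower ((PySem.Chars.split₀ (PySem.Chars.strip t)).headD []))) ||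
                PySem.Chars.startswith (PySem.Chars.lower ((PySem.Chars.split₀ (PySem.Chars.strip t)).headD [])) "w=".toList ||
                PySem.Chars.startswith (PySem.Chars.lower ((PySem.Chars.split₀ (PySem.Chars.strip t)).headD [])) "size=".toList) = true) by
              rw [hs]; simp only [Bool.false_or]; rw [hw]; simp)]
            rw [if_neg (show ¬ ((PySem.Chars.startswith (PySem.Chars.lower ((PySem.Chars.split₀ (PySem.Chars.strip t)).headD [])) "w=".toList ||
                PySem.Chars.startswith (PySem.Chars.lower ((PySem.Chars.split₀ (PySem.Chars.strip t)).headD [])) "size=".toList) = true) by rw [hw]; simp)]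
            by_cases ho : pvB_paired.contains (String.ofList (PySem.Chars.lower ((PySem.Chars.split₀ (PySem.Chars.strip t)).headD []))) = true
            · rw [if_pos ho, if_pos ho]
              dsimp only
              rw [ih rest hr (PySem.Chars.lower ((PySem.Chars.split₀ (PySem.Chars.strip t)).headD [])) (exp :: st')]
              cases hp : pT rest (some (PySem.Chars.lower ((PySem.Chars.split₀ (PySem.Chars.strip t)).headD []))) with
              | mk fst r =>
                cases fst with
                | err e => rfl
                | fin names => simp
                | close =>
                  have hrl : r.length ≤ n := by
                    have := parse_len_le rest.length rest (some (PySem.Chars.lower ((PySem.Chars.split₀ (PySem.Chars.strip t)).headD [])))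
                    unfold pT at hp
                    rw [hp] at this
                    simp at this
                    omega
                  exact ih r hrl exp st'
            · rw [Bool.not_eq_true] at ho
              rw [if_neg (by rw [ho]; simp), if_neg (by rw [ho]; simp)]

-- the whole checking phase: explicit stack loop from the empty stack = B's top-level parse
theorem topv : ∀ (n : Nat) (ts : List (List Char)), ts.length ≤ n → ∀ (flag : Bool),
    (match pvL ts [] with
     | .inl e => some e
     | .inr st =>
       if flag then some "未闭合的标签"
       else if st.isEmpty then none
       else some ("未闭合的标签：" ++ String.ofList (PySem.Chars.join [' '] st.reverse))) =
    (match pT ts none with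
     | (.err e, _) => some e
     | (.fin names, _) =>
       if flag then some "未闭合的标签"
       else if names.isEmpty then none
       else some ("未闭合的标签：" ++ String.ofList (PySem.Chars.join [' '] names))
     | (.close, _) => if flag then some "未闭合的标签" else none) := by
  intro n
  induction n with
  | zero =>
    intro ts hts flag
    have : ts = [] := List.eq_nil_of_length_eq_zero (by omega)
    subst this
    rw [pT_nil]
    simp [pvL]
  | succ n ih =>
    intro ts hts flag
    match ts with
    | [] =>
      rw [pT_nil]
      simp [pvL]
    | t :: rest =>
      have hr : rest.length ≤ n := by simp at hts; omega
      rw [pvL, pT_cons]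
      dsimp only
      by_cases hcl : PySem.Chars.startswith (PySem.Chars.strip t) ['/'] = true
      · rw [handle_closing _ _ hcl, if_pos hcl]
      · rw [handle_open _ _ (by simpa using hcl), if_neg hcl]
        by_cases hs : pvB_selfClosing.contains (String.ofList (PySem.Chars.lower ((PySem.Chars.split₀ (PySem.Chars.strip t)).headD []))) = true
        · rw [if_pos hs, if_pos (by rw [hs]; rfl)]
          exact ih rest hr flag
        · rw [Bool.not_eq_true] at hs
          rw [if_neg (by rw [hs]; simp)]
          by_cases hw : (PySem.Chars.startswith (PySem.Chars.lower ((PySem.Chars.split₀ (PySem.Chars.strip t)).headD [])) "w=".toList || PySem.Chars.startswith (PySem.Chars.lower ((PySem.Chars.split₀ (PySem.Chars.strip t)).headD [])) "size=".toList) = true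
          · rw [if_pos hw, if_pos (by rw [hs]; exact hw)]
            exact ih rest hr flag
          · rw [Bool.not_eq_true] at hw
            rw [if_neg (show ¬ ((pvB_selfClosing.contains (String.ofList (PySem.Chars.lower ((PySem.Chars.split₀ (PySem.Chars.strip t)).headD []))) ||
                PySem.Chars.startswith (PySem.Chars.lower ((PySem.Chars.split₀ (PySem.Chars.strip t)).headD [])) "w=".toList ||
                PySem.Chars.startswith (PySem.Chars.lower ((PySem.Chars.split₀ (PySem.Chars.strip t)).headD [])) "size=".toList) = true) by
              rw [hs]; simp only [Bool.false_or]; rw [hw]; simp)]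
            rw [if_neg (show ¬ ((PySem.Chars.startswith (PySem.Chars.lower ((PySem.Chars.split₀ (PySem.Chars.strip t)).headD [])) "w=".toList ||
                PySem.Chars.startswith (PySem.Chars.lower ((PySem.Chars.split₀ (PySem.Chars.strip t)).headD [])) "size=".toList) = true) by rw [hw]; simp)]
            by_cases ho : pvB_paired.contains (String.ofList (PySem.Chars.lower ((PySem.Chars.split₀ (PySem.Chars.strip t)).headD []))) = true
            · rw [if_pos ho, if_pos ho]
              dsimp only
              rw [key n rest hr (PySem.Chars.lower ((PySem.Chars.split₀ (PySem.Chars.strip t)).headD [])) []]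
              cases hp : pT rest (some (PySem.Chars.lower ((PySem.Chars.split₀ (PySem.Chars.strip t)).headD []))) with
              | mk fst r =>
                cases fst with
                | err e => rfl
                | fin names => simp [List.isEmpty_iff]
                | close =>
                  have hrl : r.length ≤ n := by
                    have := parse_len_le rest.length rest (some (PySem.Chars.lower ((PySem.Chars.split₀ (PySem.Chars.strip t)).headD [])))
                    unfold pT at hp
                    rw [hp] at this
                    simp at this
                    omega
                  exact ih r hrl flag
            · rw [Bool.not_eq_true] at ho
              rw [if_neg (by rw [ho]; simp), if_neg (by rw [ho]; simp)]

-- assembly: A's whole program = B's tokenize-then-parse pipeline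
theorem ab_eq (cs : List Char) :
    pvA_go cs [] =
      (match pT (pvTokens (sos cs)) none with
       | (.err e, _) => some e
       | (.fin names, _) =>
         if ((sos cs).getLastD []).contains '{' then some "未闭合的标签"
         else if names.isEmpty then none
         else some ("未闭合的标签：" ++ String.ofList (PySem.Chars.join [' '] names))
       | (.close, _) =>
         if ((sos cs).getLastD []).contains '{' then some "未闭合的标签" else none) := by
  rw [main_eq]
  have h := st2 cs
  unfold pvFin
  rw [← h.1, ← h.2]
  exact topv (pvTokens (sos cs)).length _ le_rfl _

-- ===== VERDICT (by name: the statement is the Claim_ definition above) =====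
theorem check_text_tags_spec : Claim_equal_check_text_tags := by
  intro s _ _
  unfold Spec_check_text_tags check_text_tags check_text_tags_alt
  rw [splitOn_eq_sos]
  exact ab_eq s.toList
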